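-- pv_equiv track=rewrite | github.com/nabilW/EmailScraping | scrapy/uae_airlines_crawler/uae_airlines_crawler/spiders/uae_multi_contacts.py | _looks_like_placeholder
-- ===== SOURCE A (Python) =====
-- def _looks_like_placeholder(email: str) -> bool:
--     placeholders = {
--         "example.com",
--         "test.com",
--         "domain.com",
--         "example@",
--         "johnsmith",
--         "providername.com",
--     }
--     return any(placeholder in email for placeholder in placeholders)
-- ===== SOURCE B (Python) =====
-- PLACEHOLDERS = ("example.com", "test.com", "domain.com",
--                 "example@", "johnsmith", "providername.com")
--
--
-- def _looks_like_placeholder(email: str) -> bool: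
--     # single left-to-right scan: at each position, test whether any
--     # placeholder starts there
--     for i in range(len(email)):
--         for p in PLACEHOLDERS:
--             if email.startswith(p, i):
--                 return True
--     return False
-- ===== Notes on version B (the rewrite author's own statement) =====
-- stated objective: alternative
-- what changed: A runs a separate whole-string substring-membership search over the email for each placeholder; B makes one left-to-right scan of the email and at each position checks whether any placeholder starts there (startswith at an offset), so the email is traversed once.
import Mathlib
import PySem

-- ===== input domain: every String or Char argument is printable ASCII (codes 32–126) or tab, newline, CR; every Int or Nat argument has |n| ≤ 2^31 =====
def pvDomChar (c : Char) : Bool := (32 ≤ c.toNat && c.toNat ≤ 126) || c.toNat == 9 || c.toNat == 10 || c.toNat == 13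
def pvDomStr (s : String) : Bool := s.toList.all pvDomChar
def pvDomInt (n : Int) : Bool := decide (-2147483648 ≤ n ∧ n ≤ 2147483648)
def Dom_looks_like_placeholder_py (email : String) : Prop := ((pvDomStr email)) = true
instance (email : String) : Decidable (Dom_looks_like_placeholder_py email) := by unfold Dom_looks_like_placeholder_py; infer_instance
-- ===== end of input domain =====

-- B makes one left-to-right scan checking each placeholder as a prefix at every position,
-- instead of A's separate whole-string 'in' search per placeholder.

-- ===== PORT A =====
-- the literal set of placeholders (all distinct, so the list holds the set's elements)
def pvPlaceholdersA : List String :=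
  ["example.com", "test.com", "domain.com", "example@", "johnsmith", "providername.com"]

-- any(placeholder in email for placeholder in placeholders)
def looks_like_placeholder_py (email : String) : Bool :=
  pvPlaceholdersA.any (fun p => PySem.Str.isIn p email)

-- ===== PORT B =====
-- PLACEHOLDERS, as character lists (B scans character positions)
def pvPlaceholdersB : List (List Char) :=
  ["example.com".toList, "test.com".toList, "domain.com".toList,
   "example@".toList, "johnsmith".toList, "providername.com".toList]

-- for i in range(len(email)): for p in PLACEHOLDERS: if email.startswith(p, i): return True
-- (recursion over the suffix starting at position i; startswith(p, i) = p prefix of that suffix)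
def pvScanB : List Char → Bool
  | [] => false
  | c :: rest =>
      (pvPlaceholdersB.any (fun p => p.isPrefixOf (c :: rest))) || pvScanB rest

def looks_like_placeholder_py_alt (email : String) : Bool :=
  pvScanB email.toList

-- ===== PRECONDITION & SPEC =====
def Spec_looks_like_placeholder_py (email : String) (out : Bool) : Prop := out = looks_like_placeholder_py_alt email
instance (email : String) (out : Bool) : Decidable (Spec_looks_like_placeholder_py email out) := by unfold Spec_looks_like_placeholder_py; infer_instance

-- ===== CLAIM (what is proved, stated in full; the proofs are below) =====
def Claim_equal_looks_like_placeholder_py : Prop := ∀ (email : String), Dom_looks_like_placeholder_py email → Spec_looks_like_placeholder_py email (looks_like_placeholder_py email)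

-- ===== LEMMAS AND PROOFS =====

-- B's scan finds exactly the lists having some placeholder as an infix
-- (every placeholder is nonempty, so the empty suffix never matters)
theorem pvScanB_eq_true_iff (l : List Char) :
    pvScanB l = true ↔ ∃ p ∈ pvPlaceholdersB, p <:+: l := by
  induction l with
  | nil =>
      simp only [pvScanB, Bool.false_eq_true, false_iff]
      rintro ⟨p, hp, hinf⟩
      have hne : p ≠ [] := by
        fin_cases hp <;> simp
      exact hne (List.eq_nil_of_infix_nil hinf)
  | cons c rest ih =>
      simp only [pvScanB, Bool.or_eq_true, List.any_eq_true, ih]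
      constructor
      · rintro (⟨p, hp, hpre⟩ | ⟨p, hp, hinf⟩)
        · exact ⟨p, hp, ((List.isPrefixOf_iff_prefix).1 hpre).isInfix⟩
        · exact ⟨p, hp, hinf.trans (List.suffix_cons c rest).isInfix⟩
      · rintro ⟨p, hp, hinf⟩
        rcases List.infix_cons_iff.1 hinf with hpre | hinf'
        · exact Or.inl ⟨p, hp, (List.isPrefixOf_iff_prefix).2 hpre⟩
        · exact Or.inr ⟨p, hp, hinf'⟩

-- A finds exactly the same condition
theorem pvA_eq_true_iff (email : String) :
    looks_like_placeholder_py email = true ↔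
      ∃ p ∈ pvPlaceholdersB, p <:+: email.toList := by
  unfold looks_like_placeholder_py
  rw [List.any_eq_true]
  constructor
  · rintro ⟨p, hp, h⟩
    exact ⟨p.toList, by fin_cases hp <;> simp [pvPlaceholdersB],
           (PySem.Str.isIn_iff_infix p email).1 h⟩
  · rintro ⟨p, hp, h⟩
    fin_cases hp <;>
      exact ⟨_, by simp [pvPlaceholdersA], (PySem.Str.isIn_iff_infix _ email).2 h⟩

-- ===== VERDICT (by name: the statement is the Claim_ definition above) =====
theorem looks_like_placeholder_py_spec : Claim_equal_looks_like_placeholder_py := by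
  intro email _
  unfold Spec_looks_like_placeholder_py looks_like_placeholder_py_alt
  rw [Bool.eq_iff_iff, pvA_eq_true_iff, pvScanB_eq_true_iff]
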